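-- pv_equiv track=rewrite | github.com/nineslop/ProgrammingCryptographicAlgorithms | Лабораторные работы КРИПТОГРАФИЯ/Шифрование шифрами однозначной замены/It's working/cardanosGrid.py | cardanosGridCheckParameters
-- ===== SOURCE A (Python) =====
-- def verticalize(GridSizeInput, GridCardano):
--     newGrid = []
--     for elem in GridCardano:
--         newGrid.append([GridSizeInput[0] - elem[0] - 1, elem[1]])
--     newGrid.sort()
--     return newGrid
--
-- def horizontalize(GridSizeInput, GridCardano):
--     newGrid = []
--     for elem in GridCardano:
--         newGrid.append([elem[0], GridSizeInput[1] - elem[1] - 1])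
--     newGrid.sort()
--     return newGrid
--
-- def cardanosGridCheckParameters(GridSizeInput, GridCardano):
--     def isArrayInArray(arr, item):
--         return item in arr
--
--     if len(GridSizeInput) != 2 or not all(GridSizeInput):
--         return False
--
--     if GridSizeInput[0] % 2 != 0 or GridSizeInput[1] % 2 != 0:
--         return False
--
--     fst = GridCardano
--     snd = horizontalize(GridSizeInput, fst)
--     trd = verticalize(GridSizeInput, snd)
--     fth = horizontalize(GridSizeInput, trd)
--
--     for elem in fst:
--         if isArrayInArray(snd, elem) or isArrayInArray(trd, elem) or isArrayInArray(fth, elem):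
--             return False
--
--     for elem in snd:
--         if isArrayInArray(fst, elem) or isArrayInArray(trd, elem) or isArrayInArray(fth, elem):
--             return False
--
--     for elem in trd:
--         if isArrayInArray(fst, elem) or isArrayInArray(snd, elem) or isArrayInArray(fth, elem):
--             return False
--
--     for elem in fth:
--         if isArrayInArray(fst, elem) or isArrayInArray(snd, elem) or isArrayInArray(trd, elem):
--             return False
--
--     return True
-- ===== SOURCE B (Python) =====
-- def cardanosGridCheckParameters(GridSizeInput, GridCardano):
--     if len(GridSizeInput) != 2 or not all(GridSizeInput):
--         return False
--     R, C = GridSizeInput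
--     if R % 2 != 0 or C % 2 != 0:
--         return False
--     # Four deduped cell sets (sorting in A never affects membership); pooled uniqueness test.
--     d1 = {tuple(e) for e in GridCardano}
--     d2 = {(e[0], C - 1 - e[1]) for e in GridCardano}
--     d3 = {(R - 1 - e[0], C - 1 - e[1]) for e in GridCardano}
--     d4 = {(R - 1 - e[0], e[1]) for e in GridCardano}
--     return len(d1) + len(d2) + len(d3) + len(d4) == len(d1 | d2 | d3 | d4)
-- ===== Notes on version B (the rewrite author's own statement) =====
-- stated objective: alternative
-- what changed: A's four nested pairwise membership scans over the four rotation grids (each a quadratic list scan) are replaced by deduplicating each rotation's cells into a set and performing a single pooled cardinality test (sum of the four set sizes equals the size of their union); the rotated cells are computed directly from GridCardano without building or sorting intermediate grids.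
import Mathlib
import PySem

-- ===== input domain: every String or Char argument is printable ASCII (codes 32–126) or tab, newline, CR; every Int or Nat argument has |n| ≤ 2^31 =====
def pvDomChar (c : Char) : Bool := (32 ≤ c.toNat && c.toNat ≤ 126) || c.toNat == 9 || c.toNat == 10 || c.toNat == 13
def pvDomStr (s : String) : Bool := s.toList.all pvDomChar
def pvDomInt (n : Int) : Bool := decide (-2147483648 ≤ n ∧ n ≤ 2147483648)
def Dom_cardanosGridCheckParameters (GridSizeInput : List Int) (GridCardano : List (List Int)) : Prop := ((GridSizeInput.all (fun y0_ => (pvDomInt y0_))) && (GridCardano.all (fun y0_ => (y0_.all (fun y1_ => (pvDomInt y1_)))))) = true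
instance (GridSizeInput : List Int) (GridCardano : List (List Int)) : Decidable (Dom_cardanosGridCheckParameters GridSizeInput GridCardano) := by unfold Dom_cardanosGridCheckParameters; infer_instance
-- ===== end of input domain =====

-- B replaces A's four nested pairwise membership scans by one pooled cardinality test over the four
-- per-rotation deduplicated cell sets, built directly without intermediate sorted lists ('alternative').

-- ===== PORT A =====
def pvVerticalize (GridSizeInput : List Int) (GridCardano : List (List Int)) : List (List Int) :=
  PySem.List.sorted
    (GridCardano.map (fun elem =>
      [PySem.List.pyGetD GridSizeInput 0 0 - PySem.List.pyGetD elem 0 0 - 1,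
       PySem.List.pyGetD elem 1 0]))
    (fun x => x) false

def pvHorizontalize (GridSizeInput : List Int) (GridCardano : List (List Int)) : List (List Int) :=
  PySem.List.sorted
    (GridCardano.map (fun elem =>
      [PySem.List.pyGetD elem 0 0,
       PySem.List.pyGetD GridSizeInput 1 0 - PySem.List.pyGetD elem 1 0 - 1]))
    (fun x => x) false

def cardanosGridCheckParameters (GridSizeInput : List Int) (GridCardano : List (List Int)) : Bool :=
  if GridSizeInput.length != 2 || !(GridSizeInput.all (fun x => x != 0)) then false
  else if PySem.Int.mod (PySem.List.pyGetD GridSizeInput 0 0) 2 != 0 ||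
          PySem.Int.mod (PySem.List.pyGetD GridSizeInput 1 0) 2 != 0 then false
  else
    let fst := GridCardano
    let snd := pvHorizontalize GridSizeInput fst
    let trd := pvVerticalize GridSizeInput snd
    let fth := pvHorizontalize GridSizeInput trd
    if fst.any (fun elem => snd.contains elem || trd.contains elem || fth.contains elem) then false
    else if snd.any (fun elem => fst.contains elem || trd.contains elem || fth.contains elem) then false
    else if trd.any (fun elem => fst.contains elem || snd.contains elem || fth.contains elem) then false
    else if fth.any (fun elem => fst.contains elem || snd.contains elem || trd.contains elem) then false
    else true

-- ===== PORT B =====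
-- Python tuples in Source B only make the cells hashable; tuple equality is entrywise, so cells stay List Int.
def cardanosGridCheckParameters_alt (GridSizeInput : List Int) (GridCardano : List (List Int)) : Bool :=
  if GridSizeInput.length != 2 || !(GridSizeInput.all (fun x => x != 0)) then false
  else
    let R := PySem.List.pyGetD GridSizeInput 0 0
    let C := PySem.List.pyGetD GridSizeInput 1 0
    if PySem.Int.mod R 2 != 0 || PySem.Int.mod C 2 != 0 then false
    else
      let d1 := PySem.Set.ofList GridCardano
      let d2 := PySem.Set.ofList (GridCardano.map (fun e =>
        [PySem.List.pyGetD e 0 0, C - 1 - PySem.List.pyGetD e 1 0]))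
      let d3 := PySem.Set.ofList (GridCardano.map (fun e =>
        [R - 1 - PySem.List.pyGetD e 0 0, C - 1 - PySem.List.pyGetD e 1 0]))
      let d4 := PySem.Set.ofList (GridCardano.map (fun e =>
        [R - 1 - PySem.List.pyGetD e 0 0, PySem.List.pyGetD e 1 0]))
      (d1.length + d2.length + d3.length + d4.length) ==
        (PySem.Set.union (PySem.Set.union (PySem.Set.union d1 d2) d3) d4).length

-- ===== PRECONDITION & SPEC =====
-- Pre_ excludes exactly the inputs where Python A raises IndexError: the guards pass but some
-- cell of GridCardano has fewer than two coordinates (A's helpers index elem[0] and elem[1]).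
def Pre_cardanosGridCheckParameters (GridSizeInput : List Int) (GridCardano : List (List Int)) : Prop :=
  (GridSizeInput.length = 2 ∧ GridSizeInput.getD 0 0 ≠ 0 ∧ GridSizeInput.getD 1 0 ≠ 0 ∧
   PySem.Int.mod (GridSizeInput.getD 0 0) 2 = 0 ∧ PySem.Int.mod (GridSizeInput.getD 1 0) 2 = 0) →
  ∀ e ∈ GridCardano, 2 ≤ e.length
instance (GridSizeInput : List Int) (GridCardano : List (List Int)) : Decidable (Pre_cardanosGridCheckParameters GridSizeInput GridCardano) := by unfold Pre_cardanosGridCheckParameters; infer_instance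

def pvWitness_cardanosGridCheckParameters : List Int × List (List Int) := ([2, 2], [[0, 0]])

def Spec_cardanosGridCheckParameters (GridSizeInput : List Int) (GridCardano : List (List Int)) (out : Bool) : Prop := out = cardanosGridCheckParameters_alt GridSizeInput GridCardano
instance (GridSizeInput : List Int) (GridCardano : List (List Int)) (out : Bool) : Decidable (Spec_cardanosGridCheckParameters GridSizeInput GridCardano out) := by unfold Spec_cardanosGridCheckParameters; infer_instance

-- ===== CLAIM (what is proved, stated in full; the proofs are below) =====
def Claim_equal_cardanosGridCheckParameters : Prop := ∀ (GridSizeInput : List Int) (GridCardano : List (List Int)), Dom_cardanosGridCheckParameters GridSizeInput GridCardano → Pre_cardanosGridCheckParameters GridSizeInput GridCardano → Spec_cardanosGridCheckParameters GridSizeInput GridCardano (cardanosGridCheckParameters GridSizeInput GridCardano)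

-- ===== LEMMAS AND PROOFS =====

theorem pvSubComm (a b : Int) : a - b - 1 = a - 1 - b := by omega

theorem pvGet0 (a b : Int) : PySem.List.pyGetD [a, b] 0 0 = a := by
  simp [PySem.List.pyGetD, PySem.List.pyGet?, PySem.List.pyIdx?]
theorem pvGet1 (a b : Int) : PySem.List.pyGetD [a, b] 1 0 = b := by
  simp [PySem.List.pyGetD, PySem.List.pyGet?, PySem.List.pyIdx?]

-- the members of A's snd grid are B's second cell set, entry by entry
theorem pvMemSnd (GS : List Int) (GC : List (List Int)) (x : List Int) :
    x ∈ pvHorizontalize GS GC ↔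
    x ∈ GC.map (fun e => [PySem.List.pyGetD e 0 0,
        PySem.List.pyGetD GS 1 0 - 1 - PySem.List.pyGetD e 1 0]) := by
  simp only [pvHorizontalize, PySem.List.mem_sorted, List.mem_map]
  constructor <;> rintro ⟨e, he, rfl⟩ <;> exact ⟨e, he, by rw [pvSubComm]⟩

-- the members of A's trd grid are B's third cell set
theorem pvMemTrd (GS : List Int) (GC : List (List Int)) (x : List Int) :
    x ∈ pvVerticalize GS (pvHorizontalize GS GC) ↔
    x ∈ GC.map (fun e => [PySem.List.pyGetD GS 0 0 - 1 - PySem.List.pyGetD e 0 0,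
        PySem.List.pyGetD GS 1 0 - 1 - PySem.List.pyGetD e 1 0]) := by
  simp only [pvVerticalize, PySem.List.mem_sorted, List.mem_map]
  constructor
  · rintro ⟨y, hy, rfl⟩
    rw [pvMemSnd] at hy
    simp only [List.mem_map] at hy
    obtain ⟨e, he, rfl⟩ := hy
    exact ⟨e, he, by rw [pvGet0, pvGet1, pvSubComm]⟩
  · rintro ⟨e, he, rfl⟩
    refine ⟨[PySem.List.pyGetD e 0 0, PySem.List.pyGetD GS 1 0 - 1 - PySem.List.pyGetD e 1 0], ?_, ?_⟩
    · rw [pvMemSnd]; exact List.mem_map_of_mem he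
    · rw [pvGet0, pvGet1, pvSubComm]

-- the members of A's fth grid are B's fourth cell set
theorem pvMemFth (GS : List Int) (GC : List (List Int)) (x : List Int) :
    x ∈ pvHorizontalize GS (pvVerticalize GS (pvHorizontalize GS GC)) ↔
    x ∈ GC.map (fun e => [PySem.List.pyGetD GS 0 0 - 1 - PySem.List.pyGetD e 0 0,
        PySem.List.pyGetD e 1 0]) := by
  rw [pvMemSnd]
  simp only [List.mem_map]
  constructor
  · rintro ⟨y, hy, rfl⟩
    rw [pvMemTrd] at hy
    simp only [List.mem_map] at hy
    obtain ⟨e, he, rfl⟩ := hy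
    refine ⟨e, he, ?_⟩
    rw [pvGet0, pvGet1]
    simp only [List.cons.injEq, and_true]
    exact ⟨trivial, by omega⟩
  · rintro ⟨e, he, rfl⟩
    refine ⟨[PySem.List.pyGetD GS 0 0 - 1 - PySem.List.pyGetD e 0 0,
             PySem.List.pyGetD GS 1 0 - 1 - PySem.List.pyGetD e 1 0], ?_, ?_⟩
    · rw [pvMemTrd]; exact List.mem_map_of_mem he
    · rw [pvGet0, pvGet1]
      simp only [List.cons.injEq, and_true]
      exact ⟨trivial, by omega⟩

-- cardinality of a union of a Set with a Nodup Set: ≤ the sum, equality exactly for disjoint sets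
theorem pvUnionCard {α : Type} [BEq α] [LawfulBEq α] (s t : PySem.Set α) (ht : t.Nodup) :
    (PySem.Set.union s t).length ≤ s.length + t.length ∧
    ((PySem.Set.union s t).length = s.length + t.length ↔ ∀ x ∈ t, x ∉ s) := by
  have h : PySem.Set.union s t = s ++ t.filter (fun y => !s.contains y) := by
    show PySem.Set.update s t = _
    rw [PySem.Set.update_eq_append_filter, PySem.Set.ofList_eq_self_of_nodup t ht]
  rw [h, List.length_append]
  constructor
  · have := List.length_filter_le (fun y => !s.contains y) t; omega
  · have := List.length_filter_le (fun y => !s.contains y) t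
    constructor
    · intro he x hx hxs
      have hlen : (t.filter (fun y => !s.contains y)).length = t.length := by omega
      have := List.length_filter_eq_length_iff.mp hlen x hx
      simp at this
      exact this hxs
    · intro hd
      have : (t.filter (fun y => !s.contains y)).length = t.length := by
        apply List.length_filter_eq_length_iff.mpr
        intro a ha; simp; exact hd a ha
      omega

-- B's pooled-cardinality test ↔ each later cell set disjoint from the earlier ones
theorem pvPooledIff {α : Type} [BEq α] [LawfulBEq α] (l1 l2 l3 l4 : List α) :
    ((PySem.Set.ofList l1).length + (PySem.Set.ofList l2).length + (PySem.Set.ofList l3).length +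
        (PySem.Set.ofList l4).length =
      (PySem.Set.union (PySem.Set.union (PySem.Set.union (PySem.Set.ofList l1) (PySem.Set.ofList l2))
          (PySem.Set.ofList l3)) (PySem.Set.ofList l4)).length) ↔
    ((∀ x ∈ l2, x ∉ l1) ∧ (∀ x ∈ l3, x ∉ l1 ∧ x ∉ l2) ∧ (∀ x ∈ l4, x ∉ l1 ∧ x ∉ l2 ∧ x ∉ l3)) := by
  set d1 := PySem.Set.ofList l1 with hd1
  set d2 := PySem.Set.ofList l2 with hd2
  set d3 := PySem.Set.ofList l3 with hd3
  set d4 := PySem.Set.ofList l4 with hd4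
  have n2 : d2.Nodup := PySem.Set.nodup_ofList l2
  have n3 : d3.Nodup := PySem.Set.nodup_ofList l3
  have n4 : d4.Nodup := PySem.Set.nodup_ofList l4
  obtain ⟨le2, eq2⟩ := pvUnionCard d1 d2 n2
  obtain ⟨le3, eq3⟩ := pvUnionCard (PySem.Set.union d1 d2) d3 n3
  obtain ⟨le4, eq4⟩ := pvUnionCard (PySem.Set.union (PySem.Set.union d1 d2) d3) d4 n4
  constructor
  · intro htot
    have g2 := eq2.mp (by omega)
    have g3 := eq3.mp (by omega)
    have g4 := eq4.mp (by omega)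
    refine ⟨?_, ?_, ?_⟩
    · intro x hx; have := g2 x (by rw [hd2, PySem.Set.mem_ofList]; exact hx)
      rw [hd1, PySem.Set.mem_ofList] at this; exact this
    · intro x hx
      have := g3 x (by rw [hd3, PySem.Set.mem_ofList]; exact hx)
      rw [PySem.Set.mem_union] at this
      rw [hd1, PySem.Set.mem_ofList, hd2, PySem.Set.mem_ofList] at this
      exact ⟨fun h => this (Or.inl h), fun h => this (Or.inr h)⟩
    · intro x hx
      have := g4 x (by rw [hd4, PySem.Set.mem_ofList]; exact hx)
      rw [PySem.Set.mem_union, PySem.Set.mem_union] at this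
      rw [hd1, PySem.Set.mem_ofList, hd2, PySem.Set.mem_ofList, hd3, PySem.Set.mem_ofList] at this
      exact ⟨fun h => this (Or.inl (Or.inl h)), fun h => this (Or.inl (Or.inr h)), fun h => this (Or.inr h)⟩
  · rintro ⟨g2, g3, g4⟩
    have h2 : (PySem.Set.union d1 d2).length = d1.length + d2.length := by
      apply eq2.mpr; intro x hx
      rw [hd2, PySem.Set.mem_ofList] at hx; rw [hd1, PySem.Set.mem_ofList]; exact g2 x hx
    have h3 : (PySem.Set.union (PySem.Set.union d1 d2) d3).length = (PySem.Set.union d1 d2).length + d3.length := by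
      apply eq3.mpr; intro x hx
      rw [hd3, PySem.Set.mem_ofList] at hx
      rw [PySem.Set.mem_union, hd1, PySem.Set.mem_ofList, hd2, PySem.Set.mem_ofList]
      rintro (h | h); exacts [(g3 x hx).1 h, (g3 x hx).2 h]
    have h4 : (PySem.Set.union (PySem.Set.union (PySem.Set.union d1 d2) d3) d4).length
        = (PySem.Set.union (PySem.Set.union d1 d2) d3).length + d4.length := by
      apply eq4.mpr; intro x hx
      rw [hd4, PySem.Set.mem_ofList] at hx
      rw [PySem.Set.mem_union, PySem.Set.mem_union, hd1, PySem.Set.mem_ofList, hd2, PySem.Set.mem_ofList, hd3, PySem.Set.mem_ofList]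
      rintro ((h | h) | h); exacts [(g4 x hx).1 h, (g4 x hx).2.1 h, (g4 x hx).2.2 h]
    omega

-- A's early-return tower of four scans, as one conjunction
theorem pvTower (a1 a2 a3 a4 : Bool) :
    ((if a1 then false else if a2 then false else if a3 then false
      else if a4 then false else true) = true)
    ↔ (a1 = false ∧ a2 = false ∧ a3 = false ∧ a4 = false) := by
  cases a1 <;> cases a2 <;> cases a3 <;> cases a4 <;> simp

-- ===== VERDICT (by name: the statement is the Claim_ definition above) =====
theorem cardanosGridCheckParameters_spec : Claim_equal_cardanosGridCheckParameters := by
  intro GS GC _hdom _hpre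
  unfold Spec_cardanosGridCheckParameters
  unfold cardanosGridCheckParameters cardanosGridCheckParameters_alt
  dsimp only
  by_cases hc1 : (GS.length != 2 || !(GS.all fun x => x != 0)) = true
  · rw [if_pos hc1, if_pos hc1]
  · rw [if_neg hc1, if_neg hc1]
    by_cases hc2 : (PySem.Int.mod (PySem.List.pyGetD GS 0 0) 2 != 0 ||
        PySem.Int.mod (PySem.List.pyGetD GS 1 0) 2 != 0) = true
    · rw [if_pos hc2, if_pos hc2]
    · rw [if_neg hc2, if_neg hc2]
      rw [Bool.eq_iff_iff, pvTower, beq_iff_eq, pvPooledIff]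
      simp only [Bool.eq_false_iff, ne_eq, List.any_eq_true, Bool.or_eq_true,
        List.contains_iff_mem, not_exists, not_and, not_or]
      simp only [pvMemFth]
      simp only [pvMemTrd]
      simp only [pvMemSnd]
      constructor
      · rintro ⟨hA1, hA2, hA3, hA4⟩
        exact ⟨fun x hx => (hA2 x hx).1.1, fun x hx => ⟨(hA3 x hx).1.1, (hA3 x hx).1.2⟩,
          fun x hx => ⟨(hA4 x hx).1.1, (hA4 x hx).1.2, (hA4 x hx).2⟩⟩
      · rintro ⟨hB2, hB3, hB4⟩
        exact ⟨fun x hx => ⟨⟨fun h => hB2 x h hx, fun h => (hB3 x h).1 hx⟩, fun h => (hB4 x h).1 hx⟩,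
          fun x hx => ⟨⟨fun h => hB2 x hx h, fun h => (hB3 x h).2 hx⟩, fun h => (hB4 x h).2.1 hx⟩,
          fun x hx => ⟨⟨fun h => (hB3 x hx).1 h, fun h => (hB3 x hx).2 h⟩, fun h => (hB4 x h).2.2 hx⟩,
          fun x hx => ⟨⟨fun h => (hB4 x hx).1 h, fun h => (hB4 x hx).2.1 h⟩, fun h => (hB4 x hx).2.2 h⟩⟩
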